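-- pv_equiv track=rewrite | github.com/KyleLuoma/SKALPEL-subsetting-evaluation | src/NlSqlBenchmark/spider2/Spider2NlSqlBenchmark.py | _make_instance_id_lookup
-- ===== SOURCE A (Python) =====
-- def _make_instance_id_lookup(questions_list: list[dict]) -> dict[tuple[str, int] : str]:
--     lookup_dict = {}
--     question_counter = {}
--     for q in questions_list:
--         if q["db"] not in question_counter.keys():
--             question_counter[q["db"]] = 0
--         else:
--             question_counter[q["db"]] += 1
--         lookup_dict[(q["db"], question_counter[q["db"]])] = q["instance_id"]
--     return lookup_dict
-- ===== SOURCE B (Python) =====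
-- def _make_instance_id_lookup(questions_list):
--     groups = {}
--     for pos, q in enumerate(questions_list):
--         groups.setdefault(q["db"], []).append((pos, q["instance_id"]))
--     entries = []
--     for db, lst in groups.items():
--         for i, (pos, iid) in enumerate(lst):
--             entries.append((pos, ((db, i), iid)))
--     entries.sort(key=lambda e: e[0])
--     return {k: v for _, (k, v) in entries}
-- ===== Notes on version B (the rewrite author's own statement) =====
-- stated objective: alternative
-- what changed: A threads a per-db counter dict through one pass; B instead groups (position, instance_id) pairs per db, derives each sequential index with enumerate over the group, and sorts the entries by original position to restore insertion order.
import Mathlib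
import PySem

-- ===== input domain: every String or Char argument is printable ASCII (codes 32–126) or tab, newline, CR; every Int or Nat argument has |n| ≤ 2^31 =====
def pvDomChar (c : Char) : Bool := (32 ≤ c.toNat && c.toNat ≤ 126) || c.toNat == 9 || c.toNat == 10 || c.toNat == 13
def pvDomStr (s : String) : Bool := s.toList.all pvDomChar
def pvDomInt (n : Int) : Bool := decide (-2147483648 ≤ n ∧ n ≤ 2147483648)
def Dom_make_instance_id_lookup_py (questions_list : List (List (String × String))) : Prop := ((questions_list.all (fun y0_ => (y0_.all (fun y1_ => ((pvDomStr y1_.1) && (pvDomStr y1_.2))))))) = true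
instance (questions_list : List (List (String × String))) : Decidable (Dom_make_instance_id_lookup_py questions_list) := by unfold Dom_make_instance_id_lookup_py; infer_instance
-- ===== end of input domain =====

-- B replaces A's threaded per-db counter with group-then-enumerate-then-sort: it groups
-- (position, instance_id) pairs per db, indexes each group with enumerate, and sorts the
-- entries back into input order (alternative decomposition, not faster).


-- ===== PORT A =====
-- q["db"] / q["instance_id"]: KeyError (= get? none) is excluded by Pre_, so getD "" is never the
-- value actually claimed; the fold threads (lookup_dict, question_counter) exactly as A's loop does.
def make_instance_id_lookup_py (questions_list : List (List (String × String))) : List (String × Int × String) :=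
  let st :=
    questions_list.foldl
      (fun (st : PySem.Dict (String × Int) String × PySem.Dict String Int) q =>
        let db : String := ((PySem.Dict.mk q).get? "db").getD ""
        let counter :=
          if st.2.contains db = false then st.2.insert db 0
          else st.2.insert db (st.2.getD db 0 + 1)
        let lookup :=
          st.1.insert (db, counter.getD db 0) (((PySem.Dict.mk q).get? "instance_id").getD "")
        (lookup, counter))
      (PySem.Dict.empty, PySem.Dict.empty)
  st.1.items.map (fun kv => (kv.1.1, kv.1.2, kv.2))

-- ===== PORT B =====
-- groups.setdefault(db, []).append(x) = Dict.modify db [] (· ++ [x]); the two nested append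
-- loops are folds; entries.sort(key=lambda e: e[0]) = PySem.List.sorted with key fst;
-- the final dict comprehension (fresh keys) = Dict.ofList.
def make_instance_id_lookup_py_alt (questions_list : List (List (String × String))) : List (String × Int × String) :=
  let groups : PySem.Dict String (List (Int × String)) :=
    (PySem.List.enumerate questions_list).foldl
      (fun g e =>
        g.modify (((PySem.Dict.mk e.2).get? "db").getD "") []
          (· ++ [(e.1, ((PySem.Dict.mk e.2).get? "instance_id").getD "")]))
      PySem.Dict.empty
  let entries : List (Int × ((String × Int) × String)) :=
    groups.items.foldl
      (fun acc kv =>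
        acc ++ (PySem.List.enumerate kv.2).map (fun p => (p.2.1, ((kv.1, p.1), p.2.2)))) []
  let se := PySem.List.sorted entries (fun e => e.1) false
  (PySem.Dict.ofList (se.map (fun e => e.2))).items.map (fun kv => (kv.1.1, kv.1.2, kv.2))

-- ===== PRECONDITION & SPEC =====
-- Pre_: every question dict carries the keys "db" and "instance_id"; on any other input
-- the Python A (and B) raises KeyError.
def Pre_make_instance_id_lookup_py (questions_list : List (List (String × String))) : Prop :=
  ∀ q ∈ questions_list, "db" ∈ q.map Prod.fst ∧ "instance_id" ∈ q.map Prod.fst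
instance (questions_list : List (List (String × String))) : Decidable (Pre_make_instance_id_lookup_py questions_list) := by unfold Pre_make_instance_id_lookup_py; infer_instance
def pvWitness_make_instance_id_lookup_py : (List (List (String × String))) :=
  [[("db", "flights"), ("instance_id", "q1")],
   [("db", "flights"), ("instance_id", "q2")],
   [("db", "pets"), ("instance_id", "q3")]]

def Spec_make_instance_id_lookup_py (questions_list : List (List (String × String))) (out : List (String × Int × String)) : Prop := out = make_instance_id_lookup_py_alt questions_list
instance (questions_list : List (List (String × String))) (out : List (String × Int × String)) : Decidable (Spec_make_instance_id_lookup_py questions_list out) := by unfold Spec_make_instance_id_lookup_py; infer_instance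

-- ===== CLAIM (what is proved, stated in full; the proofs are below) =====
def Claim_equal_make_instance_id_lookup_py : Prop := ∀ (questions_list : List (List (String × String))), Dom_make_instance_id_lookup_py questions_list → Pre_make_instance_id_lookup_py questions_list → Spec_make_instance_id_lookup_py questions_list (make_instance_id_lookup_py questions_list)

-- ===== LEMMAS AND PROOFS =====

-- the value Python reads as q["db"] / q["instance_id"] (after Pre_, get? is some)
def pvDb (q : List (String × String)) : String := ((PySem.Dict.mk q).get? "db").getD ""
def pvIid (q : List (String × String)) : String := ((PySem.Dict.mk q).get? "instance_id").getD ""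

-- reference output (as dict items), indexing each question by the count of its db in the prefix
def pvRef (pre : List String) : List (List (String × String)) → List ((String × Int) × String)
  | [] => []
  | q :: rest => ((pvDb q, (pre.count (pvDb q) : Int)), pvIid q) :: pvRef (pre ++ [pvDb q]) rest

-- positioned reference: pvRef with the original position s, s+1, … attached in front
def pvRefP (pre : List String) (s : Int) : List (List (String × String)) → List (Int × ((String × Int) × String))
  | [] => []
  | q :: rest => (s, ((pvDb q, (pre.count (pvDb q) : Int)), pvIid q)) :: pvRefP (pre ++ [pvDb q]) (s + 1) rest

-- the loop body of port A
def pvStepA (st : PySem.Dict (String × Int) String × PySem.Dict String Int)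
    (q : List (String × String)) :
    PySem.Dict (String × Int) String × PySem.Dict String Int :=
  let db : String := ((PySem.Dict.mk q).get? "db").getD ""
  let counter :=
    if st.2.contains db = false then st.2.insert db 0
    else st.2.insert db (st.2.getD db 0 + 1)
  let lookup :=
    st.1.insert (db, counter.getD db 0) (((PySem.Dict.mk q).get? "instance_id").getD "")
  (lookup, counter)

-- B's per-db group: the (position, instance_id) pairs of the questions with that db, in order
def pvGrp (qs : List (List (String × String))) (db : String) : List (Int × String) :=
  ((PySem.List.enumerate qs).filter (fun e => pvDb e.2 == db)).map (fun e => (e.1, pvIid e.2))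

-- one per-db block of B's entry list, indexed by enumerate
def pvGq (qs : List (List (String × String))) (db : String) : List (Int × ((String × Int) × String)) :=
  (PySem.List.enumerate (pvGrp qs db)).map (fun p => (p.2.1, ((db, p.1), p.2.2)))

-- B's entry list before sorting: one block per distinct db, each indexed by enumerate
def pvEntries (qs : List (List (String × String))) : List (Int × ((String × Int) × String)) :=
  (PySem.Set.ofList (qs.map pvDb)).flatMap (pvGq qs)

theorem pvRefP_snd (qs : List (List (String × String))) (pre : List String) (s : Int) :
    (pvRefP pre s qs).map (·.2) = pvRef pre qs := by
  induction qs generalizing pre s with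
  | nil => simp [pvRefP, pvRef]
  | cons q rest ih => simp [pvRefP, pvRef, ih]

theorem pvRefP_le (qs : List (List (String × String))) (pre : List String) (s : Int) :
    ∀ p ∈ pvRefP pre s qs, s ≤ p.1 := by
  induction qs generalizing pre s with
  | nil => simp [pvRefP]
  | cons q rest ih =>
    intro p hp
    simp only [pvRefP, List.mem_cons] at hp
    rcases hp with h | h
    · subst h; simp
    · have := ih (pre ++ [pvDb q]) (s + 1) p h; omega

theorem pvRefP_pairwise (qs : List (List (String × String))) (pre : List String) (s : Int) :
    (pvRefP pre s qs).Pairwise (fun a b => a.1 < b.1) := by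
  induction qs generalizing pre s with
  | nil => simp [pvRefP]
  | cons q rest ih =>
    simp only [pvRefP, List.pairwise_cons]
    refine ⟨fun p hp => ?_, ih (pre ++ [pvDb q]) (s + 1)⟩
    have := pvRefP_le rest (pre ++ [pvDb q]) (s + 1) p hp
    omega

theorem pvRefP_append (qs : List (List (String × String))) (q : List (String × String))
    (pre : List String) (s : Int) :
    pvRefP pre s (qs ++ [q]) =
      pvRefP pre s qs ++
        [(s + qs.length,
          ((pvDb q, ((pre ++ qs.map pvDb).count (pvDb q) : Int)), pvIid q))] := by
  induction qs generalizing pre s with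
  | nil => simp [pvRefP]
  | cons r rest ih =>
    simp only [List.cons_append, pvRefP, ih, List.append_assoc, List.length_cons, List.map_cons,
      List.nil_append]
    have h1 : s + 1 + (rest.length : Int) = s + ((rest.length : Nat) + 1 : Nat) := by
      push_cast; ring
    rw [h1]

theorem pvRef_key_bound (qs : List (List (String × String))) (pre : List String)
    (db : String) (i : Int) (h : (db, i) ∈ (pvRef pre qs).map Prod.fst) :
    ∃ j : Nat, i = (j : Int) ∧ pre.count db ≤ j := by
  induction qs generalizing pre with
  | nil => simp [pvRef] at h
  | cons q rest ih =>
    simp only [pvRef, List.map_cons, List.mem_cons] at h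
    rcases h with h | h
    · injection h with h1 h2
      subst h1
      exact ⟨pre.count (pvDb q), h2, le_refl _⟩
    · obtain ⟨j, hj, hle⟩ := ih (pre ++ [pvDb q]) h
      refine ⟨j, hj, le_trans ?_ hle⟩
      simp [List.count_append]

theorem pvRef_nodup_keys (qs : List (List (String × String))) (pre : List String) :
    ((pvRef pre qs).map Prod.fst).Nodup := by
  induction qs generalizing pre with
  | nil => simp [pvRef]
  | cons q rest ih =>
    simp only [pvRef, List.map_cons, List.nodup_cons]
    refine ⟨?_, ih (pre ++ [pvDb q])⟩
    intro hmem
    obtain ⟨j, hj, hle⟩ := pvRef_key_bound rest (pre ++ [pvDb q]) (pvDb q) _ hmem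
    have h1 : pre.count (pvDb q) + 1 ≤ j := by simpa [List.count_append] using hle
    have h2 : ((pre.count (pvDb q) : Int)) = (j : Int) := hj
    omega

theorem pvA_invariant (qs : List (List (String × String)))
    (lookup : PySem.Dict (String × Int) String) (counter : PySem.Dict String Int)
    (pre : List String)
    (hcnt : ∀ db, counter.get? db =
      if pre.count db = 0 then none else some ((pre.count db : Int) - 1))
    (hkeys : ∀ db i, lookup.contains (db, i) = true → ∃ j : Nat, i = (j : Int) ∧ j < pre.count db) :
    (qs.foldl pvStepA (lookup, counter)).1.items = lookup.items ++ pvRef pre qs := by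
  induction qs generalizing lookup counter pre with
  | nil => simp [pvRef]
  | cons q rest ih =>
    rw [List.foldl_cons]
    have hdb : ((PySem.Dict.mk q).get? "db").getD "" = pvDb q := rfl
    have hcontains : counter.contains (pvDb q) = (counter.get? (pvDb q)).isSome :=
      PySem.Dict.contains_eq_isSome_get? ..
    have hfresh : lookup.contains (pvDb q, ((pre.count (pvDb q) : Int))) = false := by
      cases hcc : lookup.contains (pvDb q, ((pre.count (pvDb q) : Int))) with
      | false => rfl
      | true =>
        obtain ⟨j, hj, hlt⟩ := hkeys _ _ hcc
        omega
    have hstep : pvStepA (lookup, counter) q =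
        (lookup.insert (pvDb q, ((pre.count (pvDb q) : Int)))
           (((PySem.Dict.mk q).get? "instance_id").getD ""),
         if counter.contains (pvDb q) = false then counter.insert (pvDb q) 0
         else counter.insert (pvDb q) ((pre.count (pvDb q) : Int))) := by
      by_cases h0 : pre.count (pvDb q) = 0
      · have hnone : counter.get? (pvDb q) = none := by rw [hcnt]; simp [h0]
        have hcf : counter.contains (pvDb q) = false := by rw [hcontains, hnone]; rfl
        simp only [pvStepA, hdb, hcf]
        simp [PySem.Dict.getD_insert_self, h0]
      · have hsome : counter.get? (pvDb q) = some ((pre.count (pvDb q) : Int) - 1) := by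
          rw [hcnt]; simp [h0]
        have hct : counter.contains (pvDb q) = true := by rw [hcontains, hsome]; rfl
        have hgd : counter.getD (pvDb q) 0 = (pre.count (pvDb q) : Int) - 1 :=
          PySem.Dict.getD_of_get?_eq_some _ _ hsome
        simp only [pvStepA, hdb, hct]
        rw [hgd]
        have hv : (pre.count (pvDb q) : Int) - 1 + 1 = (pre.count (pvDb q) : Int) := by ring
        rw [hv]
        simp [PySem.Dict.getD_insert_self]
    rw [hstep, ih (pre := pre ++ [pvDb q])]
    · rw [PySem.Dict.items_insert_of_not_contains _ _ hfresh]
      simp [pvRef, pvIid, List.append_assoc]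
    · intro d
      by_cases hd : d = pvDb q
      · subst hd
        have hc1 : (pre ++ [pvDb q]).count (pvDb q) = pre.count (pvDb q) + 1 := by simp
        split
        · rename_i hcb
          have hc0 : pre.count (pvDb q) = 0 := by
            by_contra h0
            have hg : counter.get? (pvDb q) = some ((pre.count (pvDb q) : Int) - 1) := by
              rw [hcnt]; simp [h0]
            have hct : counter.contains (pvDb q) = true := by rw [hcontains, hg]; rfl
            simp_all
          rw [PySem.Dict.get?_insert_self, hc1, hc0]
          simp
        · rw [PySem.Dict.get?_insert_self, hc1]
          simp
      · have hd' : d ≠ pvDb q := hd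
        have hd'' : pvDb q ≠ d := fun h => hd h.symm
        have hc1 : (pre ++ [pvDb q]).count d = pre.count d := by simp [hd'']
        split <;> rw [PySem.Dict.get?_insert_of_ne _ _ hd', hcnt, hc1]
    · intro d i hc
      rw [PySem.Dict.contains_insert] at hc
      simp only [Bool.or_eq_true, beq_iff_eq] at hc
      rcases hc with hc | hc
      · injection hc with h1 h2
        subst h1
        exact ⟨pre.count (pvDb q), h2, by simp⟩
      · obtain ⟨j, hj, hlt⟩ := hkeys d i hc
        refine ⟨j, hj, lt_of_lt_of_le hlt ?_⟩
        simp [List.count_append]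

theorem pvA_eq_ref (qs : List (List (String × String))) :
    make_instance_id_lookup_py qs = (pvRef [] qs).map (fun kv => (kv.1.1, kv.1.2, kv.2)) := by
  show ((qs.foldl pvStepA (PySem.Dict.empty, PySem.Dict.empty)).1.items.map
      (fun kv => (kv.1.1, kv.1.2, kv.2))) = _
  rw [pvA_invariant qs PySem.Dict.empty PySem.Dict.empty []
      (by intro db; simp [PySem.Dict.get?_empty])
      (by intro db i h; simp [PySem.Dict.contains_empty] at h)]
  simp [PySem.Dict.empty]

-- B's unsorted entry list is pvEntries
theorem pvB_entries (qs : List (List (String × String))) :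
    ((PySem.List.enumerate qs).foldl
      (fun (g : PySem.Dict String (List (Int × String))) e =>
        g.modify (pvDb e.2) [] (· ++ [(e.1, pvIid e.2)]))
      PySem.Dict.empty).items.foldl
      (fun acc kv =>
        acc ++ (PySem.List.enumerate kv.2).map (fun p => (p.2.1, ((kv.1, p.1), p.2.2)))) []
    = pvEntries qs := by
  have hfold :
      ((PySem.List.enumerate qs).map (fun e => (pvDb e.2, (e.1, pvIid e.2)))).foldl
        (fun (d : PySem.Dict String (List (Int × String))) p => d.modify p.1 [] (· ++ [p.2]))
        PySem.Dict.empty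
      = (PySem.List.enumerate qs).foldl
        (fun (g : PySem.Dict String (List (Int × String))) e =>
          g.modify (pvDb e.2) [] (· ++ [(e.1, pvIid e.2)])) PySem.Dict.empty := by
    rw [List.foldl_map]
  rw [← hfold]
  set l' := (PySem.List.enumerate qs).map (fun e => (pvDb e.2, (e.1, pvIid e.2))) with hl'
  set F := l'.foldl
    (fun (d : PySem.Dict String (List (Int × String))) p => d.modify p.1 [] (· ++ [p.2]))
    PySem.Dict.empty with hF
  have hmapfst : l'.map Prod.fst = qs.map pvDb := by
    rw [hl', List.map_map]
    calc (PySem.List.enumerate qs).map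
          (Prod.fst ∘ fun e : Int × List (String × String) => (pvDb e.2, (e.1, pvIid e.2)))
        = ((PySem.List.enumerate qs).map (fun x => x.2)).map pvDb := by rw [List.map_map]; rfl
      _ = qs.map pvDb := by rw [PySem.List.map_snd_enumerate]
  have hnodup : F.keys.Nodup :=
    PySem.Dict.nodup_keys_foldl_modify_key l' Prod.fst [] (fun _ p => (· ++ [p.2]))
      PySem.Dict.empty (by simp)
  have hkeys : F.keys = PySem.Set.ofList (qs.map pvDb) := by
    have h := PySem.Dict.keys_foldl_modify_key (l := l') (key := Prod.fst)
      (d0 := ([] : List (Int × String))) (f := fun _ p => (· ++ [p.2])) (d := PySem.Dict.empty)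
    rw [hF]
    refine h.trans ?_
    rw [hmapfst]
    rfl
  have hgetD : ∀ db, F.getD db [] = pvGrp qs db := by
    intro db
    have h := PySem.Dict.getD_foldl_modify_append l' PySem.Dict.empty db
    rw [hF]
    refine h.trans ?_
    rw [hl', List.filter_map, List.map_map]
    simp only [PySem.Dict.getD_empty, List.nil_append]
    rfl
  rw [PySem.List.foldl_append_eq_flatMap, List.nil_append,
    PySem.Dict.items_eq_map_keys F hnodup [], List.flatMap_map, hkeys]
  unfold pvEntries
  refine List.flatMap_congr fun db hdb => ?_
  simp only [pvGq, hgetD db]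

-- one block grows by one element at its end: moving the element to the end is a permutation
theorem pvFlatMap_perm {β : Type} (db : String) (g g' : String → List β) (x : β)
    (hgdb : g' db = g db ++ [x]) :
    ∀ (D : List String), D.Nodup → db ∈ D → (∀ d ∈ D, d ≠ db → g' d = g d) →
      (D.flatMap g').Perm (D.flatMap g ++ [x]) := by
  intro D
  induction D with
  | nil => intro _ hdb; cases hdb
  | cons d D' ih =>
    intro hD hdb h
    simp only [List.nodup_cons] at hD
    simp only [List.flatMap_cons]
    by_cases hdd : d = db
    · subst hdd
      have hrest : D'.flatMap g' = D'.flatMap g :=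
        List.flatMap_congr (fun a ha => h a (List.mem_cons_of_mem _ ha) (fun he => hD.1 (he ▸ ha)))
      rw [hgdb, hrest, List.append_assoc, List.append_assoc]
      exact List.Perm.append_left _ List.perm_append_comm
    · have hmem : db ∈ D' := by
        rcases List.mem_cons.mp hdb with h1 | h1
        · exact absurd h1.symm hdd
        · exact h1
      rw [h d List.mem_cons_self hdd, List.append_assoc]
      exact List.Perm.append_left _ (ih hD.2 hmem (fun a ha => h a (List.mem_cons_of_mem _ ha)))

-- a db no question carries has an empty group
theorem pvGrp_nil_of_not_mem (qs : List (List (String × String))) (db : String)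
    (h : db ∉ qs.map pvDb) : pvGrp qs db = [] := by
  simp only [pvGrp, List.map_eq_nil_iff, List.filter_eq_nil_iff]
  intro e he
  rw [PySem.List.mem_enumerate_iff] at he
  obtain ⟨k, hk, rfl⟩ := he
  simp only [beq_iff_eq]
  intro hdb
  exact h (by rw [← hdb]; exact List.mem_map_of_mem (List.getElem_mem hk))

-- a group's length is that db's multiplicity
theorem pvGrp_length (qs : List (List (String × String))) (db : String) :
    (pvGrp qs db).length = (qs.map pvDb).count db := by
  calc (pvGrp qs db).length
      = (PySem.List.enumerate qs).countP (fun e => pvDb e.2 == db) := by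
        simp [pvGrp, List.countP_eq_length_filter]
    _ = ((PySem.List.enumerate qs).map (fun x => x.2)).countP (fun q' => pvDb q' == db) := by
        rw [List.countP_map]; rfl
    _ = qs.countP (fun q' => pvDb q' == db) := by rw [PySem.List.map_snd_enumerate]
    _ = (qs.map pvDb).count db := by rw [List.count, List.countP_map]; rfl

-- pvEntries is a permutation of the positioned reference
theorem pvEntries_perm (qs : List (List (String × String))) :
    (pvRefP [] 0 qs).Perm (pvEntries qs) := by
  induction qs using List.reverseRecOn with
  | nil => simp [pvRefP, pvEntries, PySem.Set.ofList_eq_foldl]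
  | append_singleton qs q ih =>
    have hrefP := pvRefP_append qs q [] 0
    simp only [List.nil_append, zero_add] at hrefP
    set db0 := pvDb q with hdb0
    set x : Int × ((String × Int) × String) :=
      ((qs.length : Int), ((db0, ((qs.map pvDb).count db0 : Int)), pvIid q)) with hx
    have hmap : (qs ++ [q]).map pvDb = qs.map pvDb ++ [db0] := by simp [hdb0]
    have hsingle : PySem.List.enumerate [q] ((0 : Int) + (qs.length : Int)) =
        [((qs.length : Int), q)] := by
      simp [PySem.List.enumerate]
    have hgrow : ∀ d, d ≠ db0 → pvGrp (qs ++ [q]) d = pvGrp qs d := by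
      intro d hd
      simp only [pvGrp, PySem.List.enumerate_append, List.filter_append, List.map_append, hsingle]
      have hne : (pvDb q == d) = false := by
        simp only [beq_eq_false_iff_ne]
        exact fun he => hd (by rw [hdb0, ← he])
      have hf : List.filter (fun e => pvDb e.2 == d) [((qs.length : Int), q)] = [] := by
        simp [List.filter, hne]
      rw [hf]
      simp
    have hgrow0 : pvGrp (qs ++ [q]) db0 = pvGrp qs db0 ++ [((qs.length : Int), pvIid q)] := by
      simp only [pvGrp, PySem.List.enumerate_append, List.filter_append, List.map_append, hsingle]
      congr 1
      simp [List.filter, hdb0]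
    have hlen := pvGrp_length qs db0
    have hgq0 : pvGq (qs ++ [q]) db0 = pvGq qs db0 ++ [x] := by
      simp only [pvGq, hgrow0, PySem.List.enumerate_append, List.map_append]
      congr 1
      simp [PySem.List.enumerate, hlen, hx]
    have hgq : ∀ d, d ≠ db0 → pvGq (qs ++ [q]) d = pvGq qs d := by
      intro d hd
      simp only [pvGq, hgrow d hd]
    rw [hrefP]
    unfold pvEntries
    rw [hmap]
    have hofl : PySem.Set.ofList (qs.map pvDb ++ [db0])
        = PySem.Set.add (PySem.Set.ofList (qs.map pvDb)) db0 := by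
      simp [PySem.Set.ofList_eq_foldl, List.foldl_append]
    rw [hofl]
    by_cases hc : db0 ∈ qs.map pvDb
    · have hc' : db0 ∈ PySem.Set.ofList (qs.map pvDb) := (PySem.Set.mem_ofList _ _).mpr hc
      have hadd : PySem.Set.add (PySem.Set.ofList (qs.map pvDb)) db0
          = PySem.Set.ofList (qs.map pvDb) := by
        simp [PySem.Set.add, PySem.Set.contains, hc']
      rw [hadd]
      refine (ih.append_right [x]).trans ?_
      exact (pvFlatMap_perm db0 (pvGq qs) (pvGq (qs ++ [q])) x hgq0
        (PySem.Set.ofList (qs.map pvDb)) (PySem.Set.nodup_ofList _) hc'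
        (fun d _ hd => hgq d hd)).symm
    · have hc' : db0 ∉ PySem.Set.ofList (qs.map pvDb) :=
        fun h => hc ((PySem.Set.mem_ofList _ _).mp h)
      have hadd : PySem.Set.add (PySem.Set.ofList (qs.map pvDb)) db0
          = PySem.Set.ofList (qs.map pvDb) ++ [db0] := by
        simp [PySem.Set.add, PySem.Set.contains, hc']
      rw [hadd, List.flatMap_append]
      have h1 : (PySem.Set.ofList (qs.map pvDb)).flatMap (pvGq (qs ++ [q]))
          = (PySem.Set.ofList (qs.map pvDb)).flatMap (pvGq qs) :=
        List.flatMap_congr (fun d hd => hgq d (fun he => hc' (he ▸ hd)))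
      have h2 : List.flatMap (pvGq (qs ++ [q])) [db0] = [x] := by
        have hnil : pvGrp qs db0 = [] := pvGrp_nil_of_not_mem qs db0 hc
        rw [List.flatMap_cons, List.flatMap_nil, List.append_nil, hgq0]
        have hq0 : pvGq qs db0 = [] := by simp [pvGq, hnil]
        rw [hq0, List.nil_append]
      rw [h1, h2]
      exact ih.append_right [x]

theorem pvB_eq_ref (qs : List (List (String × String))) :
    make_instance_id_lookup_py_alt qs = (pvRef [] qs).map (fun kv => (kv.1.1, kv.1.2, kv.2)) := by
  show ((PySem.Dict.ofList
      ((PySem.List.sorted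
        (((PySem.List.enumerate qs).foldl
          (fun (g : PySem.Dict String (List (Int × String))) e =>
            g.modify (pvDb e.2) [] (· ++ [(e.1, pvIid e.2)]))
          PySem.Dict.empty).items.foldl
          (fun acc kv =>
            acc ++ (PySem.List.enumerate kv.2).map (fun p => (p.2.1, ((kv.1, p.1), p.2.2)))) [])
        (fun e => e.1)).map (fun e => e.2))).items.map (fun kv => (kv.1.1, kv.1.2, kv.2))) = _
  rw [pvB_entries,
    PySem.List.sorted_eq_of_perm_of_pairwise_lt (pvEntries qs) (pvRefP [] 0 qs) (fun e => e.1)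
      (pvEntries_perm qs) (pvRefP_pairwise qs [] 0),
    pvRefP_snd]
  congr 1
  have hitems := PySem.Dict.items_foldl_insert_fresh (pvRef [] qs) Prod.fst Prod.snd
      (PySem.Dict.empty : PySem.Dict (String × Int) String)
      (by intro a _; simp [PySem.Dict.contains_empty]) (pvRef_nodup_keys qs [])
  simpa [PySem.Dict.empty] using hitems

-- ===== VERDICT (by name: the statement is the Claim_ definition above) =====
theorem make_instance_id_lookup_py_spec : Claim_equal_make_instance_id_lookup_py := by
  intro qs _ _
  unfold Spec_make_instance_id_lookup_py
  rw [pvA_eq_ref, pvB_eq_ref]
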